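-- pv_equiv track=rewrite | github.com/GeraldKe15/TetrAI | tetrai.py | bumpiness
-- ===== SOURCE A (Python) =====
-- def bumpiness(board):
--     transposed = list(zip(*board))
--     heights = []
--     for x in transposed:
--         col = list(x)
--         i = 0
--         while i < len(board) and col[i] == 0:
--             i += 1
--         heights.append(i)
--     bumpiness = sum(abs(heights[i] - heights[i + 1])
--                     for i in range(len(heights) - 1))
--     return bumpiness
-- ===== SOURCE B (Python) =====
-- def bumpiness(board):
--     n = len(board)
--     ncols = min((len(r) for r in board), default=0)
--     heights = [None] * ncols
--     i = 0
--     for row in board: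
--         for c in range(ncols):
--             if heights[c] is None and row[c] != 0:
--                 heights[c] = i
--         i += 1
--     hs = [n if h is None else h for h in heights]
--     return sum(abs(a - b) for a, b in zip(hs, hs[1:]))
-- ===== Notes on version B (the rewrite author's own statement) =====
-- stated objective: simpler
-- what changed: B replaces the transpose-then-rescan-each-column structure with a single top-down row-major pass that records the first nonzero row per column in an Option array, then sums adjacent differences over zipped pairs.
import Mathlib
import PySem

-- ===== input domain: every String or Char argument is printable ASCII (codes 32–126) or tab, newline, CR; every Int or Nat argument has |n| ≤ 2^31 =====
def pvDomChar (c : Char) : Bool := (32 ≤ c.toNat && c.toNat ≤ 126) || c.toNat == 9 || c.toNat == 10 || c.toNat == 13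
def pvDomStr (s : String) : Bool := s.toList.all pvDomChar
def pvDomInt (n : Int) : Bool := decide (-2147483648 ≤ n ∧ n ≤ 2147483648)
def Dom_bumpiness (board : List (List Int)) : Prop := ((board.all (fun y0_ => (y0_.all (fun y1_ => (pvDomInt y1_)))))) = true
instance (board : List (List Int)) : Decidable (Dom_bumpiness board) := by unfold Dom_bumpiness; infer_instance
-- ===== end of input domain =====

-- B: single top-down row-major pass recording each column's first nonzero row instead of transposing and rescanning every column; objective: simpler.


-- ===== PORT A =====
-- min row length: Python's zip(*board) truncates to the shortest row (0 columns for an empty board)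
def pvMinLen : List (List Int) → Nat
  | [] => 0
  | [r] => r.length
  | r :: rs => min r.length (pvMinLen rs)

-- list(zip(*board)): column c exists for c < pvMinLen board; getD is exact since c is in range for every row
def pvZip (board : List (List Int)) : List (List Int) :=
  match board with
  | [] => []
  | _ => (List.range (pvMinLen board)).map (fun c => board.map (fun r => r.getD c 0))

-- the while loop 'while i < len(board) and col[i] == 0: i += 1'; getD is exact since i < n = len(col)
def pvWhile (col : List Int) (n i : Nat) : Nat :=
  if h : i < n ∧ col.getD i 0 = 0 then pvWhile col n (i + 1) else i
termination_by n - i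
decreasing_by omega

def bumpiness (board : List (List Int)) : Int :=
  let transposed := pvZip board
  let heights : List Int := transposed.map (fun col => (pvWhile col board.length 0 : Int))
  ((List.range (heights.length - 1)).map
      (fun i => |heights.getD i 0 - heights.getD (i + 1) 0|)).sum

-- ===== PORT B =====
-- inner 'for c in range(ncols)' as a paired traversal of heights and row; exact since ncols ≤ len(row) for every row
def pvUpd (i : Int) (hs : List (Option Int)) (row : List Int) : List (Option Int) :=
  match hs, row with
  | [], _ => []
  | h :: hs', [] => h :: hs'
  | h :: hs', v :: row' => (if h = none ∧ v ≠ 0 then some i else h) :: pvUpd i hs' row'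

-- 'for row in board: …; i += 1'
def pvLoop (i : Int) (rows : List (List Int)) (hs : List (Option Int)) : List (Option Int) :=
  match rows with
  | [] => hs
  | r :: rs => pvLoop (i + 1) rs (pvUpd i hs r)

def bumpiness_alt (board : List (List Int)) : Int :=
  let n : Int := board.length
  let ncols := pvMinLen board
  let filled := pvLoop 0 board (List.replicate ncols none)
  let hs := filled.map (fun h => h.getD n)
  ((hs.zip hs.tail).map (fun p => |p.1 - p.2|)).sum

-- ===== PRECONDITION & SPEC =====
def Spec_bumpiness (board : List (List Int)) (out : Int) : Prop := out = bumpiness_alt board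
instance (board : List (List Int)) (out : Int) : Decidable (Spec_bumpiness board out) := by unfold Spec_bumpiness; infer_instance

-- ===== CLAIM (what is proved, stated in full; the proofs are below) =====
def Claim_equal_bumpiness : Prop := ∀ (board : List (List Int)), Dom_bumpiness board → Spec_bumpiness board (bumpiness board)

-- ===== LEMMAS AND PROOFS =====

-- number of leading zeros of a column
def pvLz : List Int → Nat
  | [] => 0
  | x :: xs => if x = 0 then pvLz xs + 1 else 0

-- first index (counting from k) of a nonzero entry
def pvFirstNZ : List Int → Int → Option Int
  | [], _ => none
  | x :: xs, k => if x ≠ 0 then some k else pvFirstNZ xs (k + 1)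

theorem pvWhile_eq (col : List Int) (n : Nat) :
    ∀ k i, n - i = k → i ≤ n → n = col.length → pvWhile col n i = i + pvLz (col.drop i) := by
  intro k
  induction k with
  | zero =>
    intro i hk hi hn
    have : i = n := by omega
    subst this
    rw [pvWhile]
    simp [hn, List.drop_length, pvLz]
  | succ m ih =>
    intro i hk hi hn
    have hin : i < n := by omega
    have hcl : i < col.length := by omega
    have hdrop : col.drop i = col[i] :: col.drop (i + 1) := List.drop_eq_getElem_cons hcl
    rw [pvWhile]
    by_cases hz : col.getD i 0 = 0
    · simp only [hin, hz, and_self, dite_true]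
      rw [ih (i + 1) (by omega) (by omega) hn, hdrop]
      have : col[i] = 0 := by rwa [List.getD_eq_getElem col 0 hcl] at hz
      simp [pvLz, this]
      omega
    · simp only [hin, hz, and_false, dite_false]
      have : col[i] ≠ 0 := by rwa [List.getD_eq_getElem col 0 hcl] at hz
      rw [hdrop]
      simp [pvLz, this]

theorem pvFirstNZ_getD (col : List Int) :
    ∀ k : Int, (pvFirstNZ col k).getD (k + (col.length : Int)) = k + (pvLz col : Nat) := by
  induction col with
  | nil => intro k; simp [pvFirstNZ, pvLz]
  | cons x xs ih =>
    intro k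
    by_cases hx : x = 0
    · have := ih (k + 1)
      simp only [pvFirstNZ, pvLz, hx, ne_eq, not_true_eq_false, if_false, if_true,
        List.length_cons]
      have harg : k + ((xs.length : Int) + 1) = (k + 1) + (xs.length : Int) := by ring
      push_cast at this ⊢
      rw [show k + ((xs.length : Int) + 1) = (k + 1) + (xs.length : Int) by ring, this]
      ring
    · simp [pvFirstNZ, pvLz, hx]

theorem pvUpd_length (i : Int) (hs : List (Option Int)) (row : List Int) :
    (pvUpd i hs row).length = hs.length := by
  induction hs generalizing row with
  | nil => simp [pvUpd]
  | cons h hs' ih =>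
    cases row with
    | nil => simp [pvUpd]
    | cons v row' => simp [pvUpd, ih]

theorem pvLoop_length (rows : List (List Int)) :
    ∀ i hs, (pvLoop i rows hs).length = hs.length := by
  induction rows with
  | nil => intro i hs; simp [pvLoop]
  | cons r rs ih => intro i hs; simp [pvLoop, ih, pvUpd_length]

theorem pvUpd_getElem (i : Int) (hs : List (Option Int)) (row : List Int) (c : Nat)
    (hc : c < hs.length) (hcr : c < row.length) :
    (pvUpd i hs row)[c]? =
      some (if hs[c] = none ∧ row[c] ≠ 0 then some i else hs[c]) := by
  induction hs generalizing row c with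
  | nil => simp at hc
  | cons h hs' ih =>
    cases row with
    | nil => simp at hcr
    | cons v row' =>
      cases c with
      | zero => simp [pvUpd]
      | succ c' =>
        simp only [pvUpd, List.getElem?_cons_succ, List.getElem_cons_succ]
        exact ih row' c' (by simpa using hc) (by simpa using hcr)

theorem pvLoop_getElem (rows : List (List Int)) :
    ∀ (k : Int) (hs : List (Option Int)) (c : Nat), c < hs.length →
    (∀ r ∈ rows, hs.length ≤ r.length) →
    (pvLoop k rows hs)[c]? =
      some ((hs.getD c none).or (pvFirstNZ (rows.map (fun r => r.getD c 0)) k)) := by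
  induction rows with
  | nil =>
    intro k hs c hc _
    simp [pvLoop, pvFirstNZ, List.getD, List.getElem?_eq_getElem hc]
  | cons r rs ih =>
    intro k hs c hc hlen
    have hrl : hs.length ≤ r.length := hlen r (by simp)
    have hcr : c < r.length := lt_of_lt_of_le hc hrl
    have hc' : c < (pvUpd k hs r).length := by rwa [pvUpd_length]
    have hstep := ih (k + 1) (pvUpd k hs r) c hc'
      (by intro r' hr'; rw [pvUpd_length]; exact hlen r' (by simp [hr']))
    rw [pvLoop, hstep]
    have hupd := pvUpd_getElem k hs r c hc hcr
    have hgd : hs.getD c none = hs[c] := List.getD_eq_getElem hs none hc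
    have hupd' : (pvUpd k hs r).getD c none =
        (if hs[c] = none ∧ r[c] ≠ 0 then some k else hs[c]) := by
      rw [List.getD_eq_getElem (pvUpd k hs r) none hc']
      rw [List.getElem?_eq_getElem hc'] at hupd
      exact Option.some.inj hupd
    rw [hupd', hgd]
    have hrc : r.getD c 0 = r[c] := List.getD_eq_getElem r 0 hcr
    cases hcase : hs[c] with
    | some v => simp
    | none =>
      have hsome : r[c]? = some r[c] := List.getElem?_eq_getElem hcr
      by_cases hv : r[c] = 0
      · simp [List.map_cons, pvFirstNZ, List.getD, hsome, hv]
      · simp [List.map_cons, pvFirstNZ, List.getD, hsome, hv]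

theorem pvMinLen_le (board : List (List Int)) (r : List Int) (hr : r ∈ board) :
    pvMinLen board ≤ r.length := by
  induction board with
  | nil => simp at hr
  | cons x xs ih =>
    cases xs with
    | nil => simp at hr; simp [pvMinLen, hr]
    | cons y ys =>
      rcases (by simpa using hr : r = x ∨ r ∈ y :: ys) with h | h
      · subst h; simp [pvMinLen]
      · calc pvMinLen (x :: y :: ys) ≤ pvMinLen (y :: ys) := by simp [pvMinLen]
          _ ≤ r.length := ih h

-- both height lists equal this reference: leading-zero count of column c
def pvHRef (board : List (List Int)) : List Int :=
  (List.range (pvMinLen board)).map (fun c => (pvLz (board.map (fun r => r.getD c 0)) : Int))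

theorem heightsA_eq (board : List (List Int)) :
    (pvZip board).map (fun col => (pvWhile col board.length 0 : Int)) = pvHRef board := by
  cases board with
  | nil => simp [pvZip, pvHRef, pvMinLen]
  | cons b bs =>
    simp only [pvZip, pvHRef, List.map_map]
    apply List.map_congr_left
    intro c _
    simp only [Function.comp]
    congr 1
    have hlen : ((b :: bs).map (fun r => r.getD c 0)).length = (b :: bs).length := by simp
    rw [pvWhile_eq ((b :: bs).map (fun r => r.getD c 0)) (b :: bs).length
      ((b :: bs).length - 0) 0 rfl (by omega) hlen.symm]
    simp

theorem heightsB_eq (board : List (List Int)) :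
    (pvLoop 0 board (List.replicate (pvMinLen board) none)).map
        (fun h => h.getD (board.length : Int)) = pvHRef board := by
  apply List.ext_getElem
  · simp [pvLoop_length, pvHRef]
  · intro c h1 h2
    have hc : c < pvMinLen board := by
      simpa [pvLoop_length] using h1
    have hget := pvLoop_getElem board 0 (List.replicate (pvMinLen board) none) c
      (by simpa using hc) (by intro r hr; simpa using pvMinLen_le board r hr)
    have hrepl : (List.replicate (pvMinLen board) (none : Option Int)).getD c none = none := by
      simp [List.getD]
    rw [hrepl] at hget
    have hc' : c < (pvLoop 0 board (List.replicate (pvMinLen board) none)).length := by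
      simpa [pvLoop_length] using hc
    have hval : (pvLoop 0 board (List.replicate (pvMinLen board) none))[c] =
        pvFirstNZ (board.map (fun r => r.getD c 0)) 0 := by
      rw [List.getElem?_eq_getElem hc'] at hget
      simpa using Option.some.inj hget
    simp only [List.getElem_map, hval, pvHRef, List.getElem_range]
    have := pvFirstNZ_getD (board.map (fun r => r.getD c 0)) 0
    simpa using this

theorem sum_shape (xs : List Int) :
    ((List.range (xs.length - 1)).map (fun i => |xs.getD i 0 - xs.getD (i + 1) 0|)).sum =
      ((xs.zip xs.tail).map (fun p => |p.1 - p.2|)).sum := by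
  induction xs with
  | nil => simp
  | cons a ys ih =>
    cases ys with
    | nil => simp
    | cons b t =>
      have hlen : (a :: b :: t).length - 1 = (b :: t).length - 1 + 1 := by simp
      rw [hlen, List.range_succ_eq_map]
      simp only [List.map_cons, List.map_map, List.sum_cons, List.zip_cons_cons, List.tail_cons]
      have hfun : ((fun i => |(a :: b :: t).getD i 0 - (a :: b :: t).getD (i + 1) 0|) ∘ Nat.succ)
          = (fun i => |(b :: t).getD i 0 - (b :: t).getD (i + 1) 0|) := by
        funext i
        simp [Function.comp]
      rw [hfun]
      have ih' := ih
      simp only [List.tail_cons] at ih'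
      rw [ih']
      simp

theorem pvHRef_eq_helper (board : List (List Int)) : bumpiness board = bumpiness_alt board := by
  unfold bumpiness bumpiness_alt
  dsimp only
  rw [heightsA_eq, heightsB_eq, sum_shape]

-- ===== VERDICT (by name: the statement is the Claim_ definition above) =====
theorem bumpiness_spec : Claim_equal_bumpiness := by
  intro board _
  unfold Spec_bumpiness
  exact pvHRef_eq_helper board
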